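-- pv_equiv track=rewrite | github.com/staffanosp/Advent-of-Code | 2023/python/Day-03/Day_03.py | solution
-- ===== SOURCE A (Python) =====
-- def is_symbol(char):
--     return not char in "0123456789."
--
-- def get_adj_coords(start_x, end_x, y):
--     adj_coords = []
--
--     for adj_y in range(y - 1, y + 2):
--         if adj_y == y:
--             adj_coords.append((start_x - 1, y))
--             adj_coords.append((end_x + 1, y))
--
--         else:
--             for adj_x in range(start_x - 1, end_x + 2):
--                 adj_coords.append((adj_x, adj_y))
--
--     return adj_coords
--
-- def solution(input_data, part):
--     symbols = []
--     gears = []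
--     numbers = []
--
--     # store numbers, symbols and gears
--     for y, line in enumerate(input_data):
--         number_start_x = None
--         curr_number = ""
--
--         for x, char in enumerate(line):
--             if char.isdigit():
--                 if not curr_number:
--                     number_start_x = x
--
--                 curr_number += char
--
--                 # store number at end of lines
--                 if x == len(line) - 1:
--                     numbers.append((int(curr_number), number_start_x, x, y))
--
--             else:
--                 # store number
--                 if curr_number:
--                     numbers.append((int(curr_number), number_start_x, x - 1, y))
--                     number_start_x = None
--                     curr_number = ""
--
--                 # store symbols
--                 if is_symbol(char):
--                     symbols.append((x, y))
--
--                     # store gears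
--                     if char == "*":
--                         gears.append((x, y))
--
--     if part == 1:
--         return sum(
--             [
--                 number
--                 for number, start_x, end_x, y in numbers
--                 if set(get_adj_coords(start_x, end_x, y)) & set(symbols)
--             ]
--         )
--
--     elif part == 2:
--         gear_ratios = []
--
--         for gear in gears:
--             adj_numbers = []
--
--             for number, start_x, end_x, y in numbers:
--                 if gear in get_adj_coords(start_x, end_x, y):
--                     adj_numbers.append(number)
--
--             if len(adj_numbers) == 2:
--                 gear_ratios.append(adj_numbers[0] * adj_numbers[1])
--
--         return sum(gear_ratios)
-- ===== SOURCE B (Python) =====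
-- def adjacent(start_x, end_x, y):
--     # bounding-box neighbours of the digit run [start_x, end_x] on row y
--     return ([(start_x - 1, y), (end_x + 1, y)]
--             + [(ax, y - 1) for ax in range(start_x - 1, end_x + 2)]
--             + [(ax, y + 1) for ax in range(start_x - 1, end_x + 2)])
--
--
-- def solution(input_data, part):
--     numbers = []        # (value, start_x, end_x, y)
--     symbols = set()
--     gears = []
--
--     # run-scanning parse: jump over each digit run in one step
--     for y, line in enumerate(input_data):
--         n = len(line)
--         x = 0
--         while x < n:
--             ch = line[x]
--             if ch.isdigit():
--                 j = x
--                 while j < n and line[j].isdigit():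
--                     j += 1
--                 numbers.append((int(line[x:j]), x, j - 1, y))
--                 x = j
--             else:
--                 if ch != ".":
--                     symbols.add((x, y))
--                     if ch == "*":
--                         gears.append((x, y))
--                 x += 1
--
--     if part == 1:
--         return sum(v for v, sx, ex, y in numbers
--                    if any(c in symbols for c in adjacent(sx, ex, y)))
--
--     elif part == 2:
--         gear_set = set(gears)
--         # one pass over the numbers: distribute each number to its adjacent gears
--         adj_lists = {}
--         for v, sx, ex, y in numbers:
--             for c in adjacent(sx, ex, y):
--                 if c in gear_set:
--                     adj_lists.setdefault(c, []).append(v)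
--         return sum(adj_lists.get(g, [])[0] * adj_lists.get(g, [])[1]
--                    for g in gears if len(adj_lists.get(g, [])) == 2)
-- ===== Notes on version B (the rewrite author's own statement) =====
-- stated objective: alternative
-- what changed: B parses each line by jumping over whole digit runs (slice + int once per run instead of A's char-by-char string accumulation), checks each number's neighbourhood against a symbol set built once (instead of A's per-number set(symbols) intersection), and for part 2 makes one pass over the numbers distributing each to its adjacent gears via a dict instead of A's per-gear rescan of every number.
-- outside the precondition, e.g. on solution(['1*1'], 3): A returns None, B returns None
import Mathlib
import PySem

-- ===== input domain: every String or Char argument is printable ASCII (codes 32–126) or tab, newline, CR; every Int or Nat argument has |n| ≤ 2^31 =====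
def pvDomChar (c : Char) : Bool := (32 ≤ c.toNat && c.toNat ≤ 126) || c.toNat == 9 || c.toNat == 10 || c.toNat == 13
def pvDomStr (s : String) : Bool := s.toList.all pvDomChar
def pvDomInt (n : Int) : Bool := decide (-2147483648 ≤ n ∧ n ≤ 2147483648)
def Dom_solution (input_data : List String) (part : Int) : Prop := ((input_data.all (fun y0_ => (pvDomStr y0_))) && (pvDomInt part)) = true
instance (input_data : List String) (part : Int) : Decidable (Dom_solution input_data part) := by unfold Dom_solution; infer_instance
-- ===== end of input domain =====

-- B replaces A's per-number set(symbols) intersections and per-gear rescans of all numbers by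
-- one symbol set built once and one pass over the numbers distributing them to adjacent gears.

-- ===== PORT A =====
def isSymbolA (c : Char) : Bool := !("0123456789.".toList.contains c)

def getAdjCoords (startX endX y : Int) : List (Int × Int) :=
  (PySem.List.pyRange (y - 1) (y + 2) 1).foldl (fun acc adjY =>
    if adjY == y then
      acc ++ [(startX - 1, y)] ++ [(endX + 1, y)]
    else
      (PySem.List.pyRange (startX - 1) (endX + 2) 1).foldl (fun acc2 adjX => acc2 ++ [(adjX, adjY)]) acc) []

-- the inner 'for x, char in enumerate(line)' loop body; state = (numbers, symbols, gears, number_start_x, curr_number)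
def lineStepA (y n : Int)
    (s : List (Int × Int × Int × Int) × List (Int × Int) × List (Int × Int) × Option Int × List Char)
    (xc : Int × Char) :
    List (Int × Int × Int × Int) × List (Int × Int) × List (Int × Int) × Option Int × List Char :=
  let nums := s.1; let syms := s.2.1; let grs := s.2.2.1; let st := s.2.2.2.1; let curr := s.2.2.2.2
  let x := xc.1; let c := xc.2
  if PySem.Chars.isdigit c then
    let st' := if curr.isEmpty then some x else st
    let curr' := curr ++ [c]
    let nums' := if x == n - 1 then nums ++ [((PySem.Int.ofChars? curr').getD 0, st'.getD 0, x, y)] else nums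
    (nums', syms, grs, st', curr')
  else
    let t1 := if curr.isEmpty then (nums, st, curr)
              else (nums ++ [((PySem.Int.ofChars? curr).getD 0, st.getD 0, x - 1, y)], none, ([] : List Char))
    if isSymbolA c then
      if c == '*' then (t1.1, syms ++ [(x, y)], grs ++ [(x, y)], t1.2.1, t1.2.2)
      else (t1.1, syms ++ [(x, y)], grs, t1.2.1, t1.2.2)
    else (t1.1, syms, grs, t1.2.1, t1.2.2)

def parseLineA (acc : List (Int × Int × Int × Int) × List (Int × Int) × List (Int × Int)) (y : Int) (line : List Char) :
    List (Int × Int × Int × Int) × List (Int × Int) × List (Int × Int) :=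
  let s := (PySem.List.enumerate line 0).foldl (lineStepA y (PySem.List.len line)) (acc.1, acc.2.1, acc.2.2, none, [])
  (s.1, s.2.1, s.2.2.1)

def parseA (input_data : List String) : List (Int × Int × Int × Int) × List (Int × Int) × List (Int × Int) :=
  (PySem.List.enumerate input_data 0).foldl (fun acc yl => parseLineA acc yl.1 yl.2.toList) ([], [], [])

def solution (input_data : List String) (part : Int) : Int :=
  let p := parseA input_data
  let numbers := p.1
  let symbols := p.2.1
  let gears := p.2.2
  if part == 1 then
    ((numbers.filter (fun t =>
        !(PySem.Set.inter (PySem.Set.ofList (getAdjCoords t.2.1 t.2.2.1 t.2.2.2)) (PySem.Set.ofList symbols)).isEmpty)).map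
      (fun t => t.1)).sum
  else if part == 2 then
    (gears.foldl (fun ratios g =>
      let adjNums := numbers.foldl (fun a t =>
        if (getAdjCoords t.2.1 t.2.2.1 t.2.2.2).contains g then a ++ [t.1] else a) []
      if PySem.List.len adjNums == 2 then
        ratios ++ [PySem.List.pyGetD adjNums 0 0 * PySem.List.pyGetD adjNums 1 0]
      else ratios) ([] : List Int)).sum
  else 0  -- Python returns None (not an Int) here; excluded by Pre_solution

-- ===== PORT B =====
def adjacentB (startX endX y : Int) : List (Int × Int) :=
  [(startX - 1, y), (endX + 1, y)]
    ++ (PySem.List.pyRange (startX - 1) (endX + 2) 1).map (fun ax => (ax, y - 1))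
    ++ (PySem.List.pyRange (startX - 1) (endX + 2) 1).map (fun ax => (ax, y + 1))

-- Source B's index-based 'while x < n' scan, ported as structural recursion on the remaining
-- suffix cs = line[x:]; the inner 'while j < n and line[j].isdigit()' scan together with the
-- slice line[x:j] is exactly the maximal digit run takeWhile/dropWhile splits off.
def scanLineB (y : Int) (acc : List (Int × Int × Int × Int) × PySem.Set (Int × Int) × List (Int × Int))
    (x : Int) (cs : List Char) :
    List (Int × Int × Int × Int) × PySem.Set (Int × Int) × List (Int × Int) :=
  match cs with
  | [] => acc
  | c :: rest =>
    if PySem.Chars.isdigit c then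
      let run := (c :: rest).takeWhile PySem.Chars.isdigit
      scanLineB y
        (acc.1 ++ [((PySem.Int.ofChars? run).getD 0, x, x + run.length - 1, y)], acc.2.1, acc.2.2)
        (x + run.length) ((c :: rest).dropWhile PySem.Chars.isdigit)
    else
      if c != '.' then
        if c == '*' then scanLineB y (acc.1, PySem.Set.add acc.2.1 (x, y), acc.2.2 ++ [(x, y)]) (x + 1) rest
        else scanLineB y (acc.1, PySem.Set.add acc.2.1 (x, y), acc.2.2) (x + 1) rest
      else scanLineB y acc (x + 1) rest
termination_by cs.length
decreasing_by
  · simp only [List.dropWhile_cons_of_pos ‹_›]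
    have := List.length_dropWhile_le (p := PySem.Chars.isdigit) rest
    simp; omega
  all_goals simp

def parseB (input_data : List String) :
    List (Int × Int × Int × Int) × PySem.Set (Int × Int) × List (Int × Int) :=
  (PySem.List.enumerate input_data 0).foldl (fun acc yl => scanLineB yl.1 acc 0 yl.2.toList)
    ([], PySem.Set.empty, [])

def solution_alt (input_data : List String) (part : Int) : Int :=
  let p := parseB input_data
  let numbers := p.1
  let symbols := p.2.1
  let gears := p.2.2
  if part == 1 then
    ((numbers.filter (fun t =>
        (adjacentB t.2.1 t.2.2.1 t.2.2.2).any (fun c => PySem.Set.contains symbols c))).map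
      (fun t => t.1)).sum
  else if part == 2 then
    let gearSet := PySem.Set.ofList gears
    let adjLists := numbers.foldl (fun d t =>
      (adjacentB t.2.1 t.2.2.1 t.2.2.2).foldl (fun d c =>
        if PySem.Set.contains gearSet c then d.modify c [] (fun l => l ++ [t.1]) else d) d)
      PySem.Dict.empty
    ((gears.filter (fun g => PySem.List.len (adjLists.getD g []) == 2)).map (fun g =>
      PySem.List.pyGetD (adjLists.getD g []) 0 0 * PySem.List.pyGetD (adjLists.getD g []) 1 0)).sum
  else 0

-- ===== PRECONDITION & SPEC =====
-- Pre_ excludes only part ∉ {1, 2}, where Python A falls through both branches and returns None,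
-- which is not an Int.
def Pre_solution (input_data : List String) (part : Int) : Prop := part = 1 ∨ part = 2
instance (input_data : List String) (part : Int) : Decidable (Pre_solution input_data part) := by
  unfold Pre_solution; infer_instance

def pvWitness_solution : List String × Int := (["467..114..", "...*......", "..35..633."], 1)

def Spec_solution (input_data : List String) (part : Int) (out : Int) : Prop := out = solution_alt input_data part
instance (input_data : List String) (part : Int) (out : Int) : Decidable (Spec_solution input_data part out) := by
  unfold Spec_solution; infer_instance

-- ===== CLAIM (what is proved, stated in full; the proofs are below) =====
def Claim_equal_solution : Prop := ∀ (input_data : List String) (part : Int), Dom_solution input_data part → Pre_solution input_data part → Spec_solution input_data part (solution input_data part)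

-- ===== LEMMAS AND PROOFS =====


-- helper: A's symbol test agrees with B's on non-digit characters
theorem isSymbolA_eq (c : Char) (h : PySem.Chars.isdigit c = false) : isSymbolA c = (c != '.') := by
  by_cases hc : c = '.'
  · subst hc; decide
  · have hd : '0' ≤ c → '9' < c := by
      simpa [PySem.Chars.isdigit, Bool.and_eq_false_iff, decide_eq_false_iff_not, not_le] using h
  -- placeholder
    have h0 : c ≠ '0' := by rintro rfl; exact absurd (hd (by decide)) (by decide)
    have h1 : c ≠ '1' := by rintro rfl; exact absurd (hd (by decide)) (by decide)
    have h2 : c ≠ '2' := by rintro rfl; exact absurd (hd (by decide)) (by decide)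
    have h3 : c ≠ '3' := by rintro rfl; exact absurd (hd (by decide)) (by decide)
    have h4 : c ≠ '4' := by rintro rfl; exact absurd (hd (by decide)) (by decide)
    have h5 : c ≠ '5' := by rintro rfl; exact absurd (hd (by decide)) (by decide)
    have h6 : c ≠ '6' := by rintro rfl; exact absurd (hd (by decide)) (by decide)
    have h7 : c ≠ '7' := by rintro rfl; exact absurd (hd (by decide)) (by decide)
    have h8 : c ≠ '8' := by rintro rfl; exact absurd (hd (by decide)) (by decide)
    have h9 : c ≠ '9' := by rintro rfl; exact absurd (hd (by decide)) (by decide)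
    simp [isSymbolA, hc, h0, h1, h2, h3, h4, h5, h6, h7, h8, h9,
      show "0123456789.".toList = ['0','1','2','3','4','5','6','7','8','9','.'] from rfl]

-- stepping A's inner fold across a maximal digit run
theorem runA (y n : Int) (ds : List Char) :
    ∀ (rest : List Char) (x : Int) (nums : List (Int × Int × Int × Int)) (syms grs : List (Int × Int))
      (st : Option Int) (curr : List Char),
      (∀ c ∈ ds, PySem.Chars.isdigit c = true) → x + ds.length ≤ n →
      (PySem.List.enumerate (ds ++ rest) x).foldl (lineStepA y n) (nums, syms, grs, st, curr) =
        (PySem.List.enumerate rest (x + ds.length)).foldl (lineStepA y n)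
          ((if ds ≠ [] ∧ x + ds.length = n then
              nums ++ [((PySem.Int.ofChars? (curr ++ ds)).getD 0,
                        ((if curr.isEmpty ∧ ds ≠ [] then some x else st)).getD 0,
                        n - 1, y)]
            else nums),
           syms, grs, (if curr.isEmpty ∧ ds ≠ [] then some x else st), curr ++ ds) := by
  induction ds with
  | nil => intro rest x nums syms grs st curr _ _; simp
  | cons c ds' ih =>
    intro rest x nums syms grs st curr hds hle
    have hc : PySem.Chars.isdigit c = true := hds c (List.mem_cons_self ..)
    simp only [List.cons_append, PySem.List.enumerate_cons, List.foldl_cons]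
    by_cases hx : x = n - 1
    · have hds0 : ds' = [] := by
        have := hle; simp only [List.length_cons] at this
        have : ds'.length = 0 := by omega
        exact List.eq_nil_of_length_eq_zero this
      subst hds0
      simp only [lineStepA, hc, List.nil_append,
        List.length_cons, List.length_nil, Nat.zero_add, Nat.cast_one]
      have hb : ((x : Int) == n - 1) = true := by simp [hx]
      simp only [hb, if_true, ne_eq, reduceCtorEq, not_false_iff, true_and, and_true]
      rw [if_pos (by omega : x + 1 = n)]
      rw [show x = n - 1 from hx]
    · have hle' : (x + 1) + ds'.length ≤ n := by
        simp only [List.length_cons] at hle; push_cast at hle ⊢; omega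
      have hb : ((x : Int) == n - 1) = false := by simp [hx]
      simp only [lineStepA, hc, hb, Bool.false_eq_true, if_false, if_true]
      rw [ih rest (x + 1) nums syms grs (if curr.isEmpty then some x else st) (curr ++ [c])
        (fun d hd => hds d (List.mem_cons_of_mem _ hd)) hle']
      have hemp : (curr ++ [c]).isEmpty = false := by simp
      have harr : curr ++ [c] ++ ds' = curr ++ (c :: ds') := by simp
      have hlen : (x + 1 + (ds'.length : Int)) = x + ((c :: ds').length : Int) := by
        simp only [List.length_cons]; push_cast; ring
      simp only [hemp, Bool.false_eq_true, false_and, if_false, ne_eq, reduceCtorEq,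
        not_false_iff, true_and, and_true, harr, hlen]
      by_cases hn2 : x + ((c :: ds').length : Int) = n
      · have hne' : ds' ≠ [] := by
          rintro rfl
          simp only [List.length_cons, List.length_nil] at hn2; push_cast at hn2; omega
        rw [if_pos (⟨hne', hn2⟩ : ds' ≠ [] ∧ x + ((c :: ds').length : Int) = n),
           if_pos hn2]
      · rw [if_neg (fun h => hn2 h.2), if_neg hn2]

-- the per-line equivalence: B's run-scan equals A's char-by-char fold
theorem lineEq (y n : Int) (fuel : Nat) :
    ∀ (cs : List Char), cs.length ≤ fuel → ∀ (x : Int)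
      (nums : List (Int × Int × Int × Int)) (syms grs : List (Int × Int)),
      x + cs.length = n →
      scanLineB y (nums, PySem.Set.ofList syms, grs) x cs =
        ((((PySem.List.enumerate cs x).foldl (lineStepA y n) (nums, syms, grs, none, [])).1),
         PySem.Set.ofList (((PySem.List.enumerate cs x).foldl (lineStepA y n) (nums, syms, grs, none, [])).2.1),
         (((PySem.List.enumerate cs x).foldl (lineStepA y n) (nums, syms, grs, none, [])).2.2.1)) := by
  induction fuel with
  | zero =>
    intro cs hcs x nums syms grs hn
    have : cs = [] := List.eq_nil_of_length_eq_zero (Nat.le_zero.mp hcs)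
    subst this
    simp [scanLineB]
  | succ fuel ih =>
    intro cs hcs x nums syms grs hn
    match cs, hcs, hn with
    | [], _, _ => simp [scanLineB]
    | c :: rest, hcs, hn =>
      by_cases hc : PySem.Chars.isdigit c
      · -- digit run case
        have hsplit : (c :: rest).takeWhile PySem.Chars.isdigit ++ (c :: rest).dropWhile PySem.Chars.isdigit
            = c :: rest := List.takeWhile_append_dropWhile
        have hall : ∀ d ∈ (c :: rest).takeWhile PySem.Chars.isdigit, PySem.Chars.isdigit d = true :=
          fun d hd => List.mem_takeWhile_imp hd
        have hrunc : (c :: rest).takeWhile PySem.Chars.isdigit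
            = c :: rest.takeWhile PySem.Chars.isdigit := List.takeWhile_cons_of_pos hc
        have hrun_ne : (c :: rest).takeWhile PySem.Chars.isdigit ≠ [] := by
          rw [hrunc]; exact List.cons_ne_nil _ _
        have hlens := congrArg List.length hsplit
        simp only [List.length_append, List.length_cons] at hlens
        rw [scanLineB]
        simp only [hc, if_true]
        conv_rhs => rw [← hsplit]
        rw [runA y n _ _ x nums syms grs none [] hall (by
          simp only [List.length_cons] at hn; push_cast at hn ⊢; omega)]
        simp only [List.isEmpty_nil, true_and, List.nil_append]
        cases hre : (c :: rest).dropWhile PySem.Chars.isdigit with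
        | nil =>
          rw [hre] at hlens
          have hfull : ((c :: rest).takeWhile PySem.Chars.isdigit).length = rest.length + 1 := by
            simpa using hlens
          simp only [PySem.List.enumerate_nil, List.foldl_nil, scanLineB]
          rw [if_pos ⟨hrun_ne, by simp only [List.length_cons] at hn; rw [hfull]; push_cast at hn ⊢; omega⟩]
          simp only [hrun_ne, ne_eq, not_false_iff, if_true]
          have hend : x + ((((c :: rest).takeWhile PySem.Chars.isdigit).length : Int)) - 1 = n - 1 := by
            simp only [List.length_cons] at hn; rw [hfull]; push_cast at hn ⊢; omega
          rw [hend]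
          rfl
        | cons d tail =>
          rw [hre] at hlens
          have hd : PySem.Chars.isdigit d = false := by
            have := List.head_dropWhile_not PySem.Chars.isdigit
              (l := c :: rest) (by rw [hre]; exact List.cons_ne_nil _ _)
            simpa [hre] using this
          have hlen2 : ((c :: rest).takeWhile PySem.Chars.isdigit).length + tail.length + 1
              = rest.length + 1 := by
            simp only [List.length_cons] at hlens; omega
          have hnot_end : ¬ (x + (((c :: rest).takeWhile PySem.Chars.isdigit).length : Int) = n) := by
            simp only [List.length_cons] at hn; push_cast at hn ⊢; omega
          rw [if_neg (fun h => hnot_end h.2)]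
          simp only [PySem.List.enumerate_cons, List.foldl_cons]
          simp only [hrun_ne, ne_eq, not_false_iff, if_true]
          have hie : (List.takeWhile PySem.Chars.isdigit (c :: rest)).isEmpty = false := by
            simp [hrunc]
          have hge : 1 ≤ (List.takeWhile PySem.Chars.isdigit (c :: rest)).length := by
            rw [hrunc]; simp
          simp only [lineStepA, hd, Bool.false_eq_true, if_false, hie, Option.getD_some]
          rw [isSymbolA_eq d hd]
          rw [scanLineB]
          simp only [hd, Bool.false_eq_true, if_false]
          have htail_le : tail.length ≤ fuel := by
            simp only [List.length_cons] at hcs; omega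
          have hn' : (x + (((c :: rest).takeWhile PySem.Chars.isdigit).length : Int) + 1)
              + tail.length = n := by
            simp only [List.length_cons] at hn; push_cast at hn ⊢; omega
          by_cases hdot : d = '.'
          · simp only [hdot, bne_self_eq_false, Bool.false_eq_true, if_false]
            exact ih tail htail_le _ _ _ _ hn'
          · have hbne : (d != '.') = true := by simp [hdot]
            simp only [hbne, if_true]
            by_cases hstar : d = '*'
            · simp only [show (d == '*') = true by simp [hstar], if_true]
              rw [← PySem.Set.ofList_append_singleton]
              exact ih tail htail_le _ _ _ _ hn'
            · simp only [show (d == '*') = false by simp [hstar], Bool.false_eq_true, if_false]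
              rw [← PySem.Set.ofList_append_singleton]
              exact ih tail htail_le _ _ _ _ hn'
      · -- non-digit head
        have hcf : PySem.Chars.isdigit c = false := Bool.eq_false_iff.mpr hc
        rw [scanLineB]
        simp only [hcf, Bool.false_eq_true, if_false]
        simp only [PySem.List.enumerate_cons, List.foldl_cons, lineStepA, hcf,
          Bool.false_eq_true, if_false, List.isEmpty_nil, if_true]
        rw [isSymbolA_eq c hcf]
        have hrest_le : rest.length ≤ fuel := by
          simp only [List.length_cons] at hcs; omega
        have hn' : (x + 1) + rest.length = n := by
          simp only [List.length_cons] at hn; push_cast at hn ⊢; omega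
        by_cases hdot : c = '.'
        · simp only [hdot, bne_self_eq_false, Bool.false_eq_true, if_false]
          exact ih rest hrest_le _ _ _ _ hn'
        · have hbne : (c != '.') = true := by simp [hdot]
          simp only [hbne, if_true]
          by_cases hstar : c = '*'
          · simp only [show (c == '*') = true by simp [hstar], if_true]
            rw [← PySem.Set.ofList_append_singleton]
            exact ih rest hrest_le _ _ _ _ hn'
          · simp only [show (c == '*') = false by simp [hstar], Bool.false_eq_true, if_false]
            rw [← PySem.Set.ofList_append_singleton]
            exact ih rest hrest_le _ _ _ _ hn'

theorem parseOuter (lines : List String) :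
    ∀ (s : Int) (accN : List (Int × Int × Int × Int)) (accS accG : List (Int × Int)),
      (PySem.List.enumerate lines s).foldl (fun acc yl => scanLineB yl.1 acc 0 yl.2.toList)
          (accN, PySem.Set.ofList accS, accG) =
        ((((PySem.List.enumerate lines s).foldl (fun acc yl => parseLineA acc yl.1 yl.2.toList) (accN, accS, accG)).1),
         PySem.Set.ofList (((PySem.List.enumerate lines s).foldl (fun acc yl => parseLineA acc yl.1 yl.2.toList) (accN, accS, accG)).2.1),
         (((PySem.List.enumerate lines s).foldl (fun acc yl => parseLineA acc yl.1 yl.2.toList) (accN, accS, accG)).2.2)) := by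
  induction lines with
  | nil => intro s accN accS accG; simp
  | cons l ls ih =>
    intro s accN accS accG
    simp only [PySem.List.enumerate_cons, List.foldl_cons]
    rw [lineEq s (PySem.List.len l.toList) l.toList.length l.toList le_rfl 0 accN accS accG
      (by simp [PySem.List.len_eq])]
    simp only [parseLineA]
    exact ih (s + 1) _ _ _

theorem parse_eq (input_data : List String) :
    parseB input_data
      = ((parseA input_data).1, PySem.Set.ofList (parseA input_data).2.1, (parseA input_data).2.2) := by
  unfold parseB parseA
  exact parseOuter input_data 0 [] [] []

theorem getAdjCoords_eq (sx ex y : Int) :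
    getAdjCoords sx ex y =
      ((PySem.List.pyRange (sx - 1) (ex + 2) 1).map (fun ax => (ax, y - 1)))
        ++ [(sx - 1, y)] ++ [(ex + 1, y)]
        ++ ((PySem.List.pyRange (sx - 1) (ex + 2) 1).map (fun ax => (ax, y + 1))) := by
  unfold getAdjCoords
  have h3 : PySem.List.pyRange (y - 1) (y + 2) 1 = [y - 1, y, y + 1] := by
    rw [PySem.List.pyRange_one_cons (by omega)]
    rw [show y - 1 + 1 = y from by ring]
    rw [PySem.List.pyRange_one_cons (by omega)]
    rw [PySem.List.pyRange_one_cons (by omega)]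
    rw [show y + 1 + 1 = y + 2 from by ring]
    rw [PySem.List.pyRange_one_eq_nil le_rfl]
  rw [h3]
  simp only [List.foldl_cons, List.foldl_nil]
  rw [if_neg (by simp), if_pos (by simp), if_neg (by simp)]
  rw [PySem.List.foldl_append_singleton_eq_map, PySem.List.foldl_append_singleton_eq_map]
  simp [List.append_assoc]

theorem mem_adj_iff (sx ex y : Int) (p : Int × Int) :
    p ∈ getAdjCoords sx ex y ↔ p ∈ adjacentB sx ex y := by
  simp only [getAdjCoords_eq, adjacentB, List.mem_append, List.mem_map,
    PySem.List.mem_pyRange_one, List.mem_cons, List.not_mem_nil, or_false]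
  constructor
  · rintro (((h | h) | h) | h)
    exacts [Or.inl (Or.inr h), Or.inl (Or.inl (Or.inl h)), Or.inl (Or.inl (Or.inr h)), Or.inr h]
  · rintro (((h | h) | h) | h)
    exacts [Or.inl (Or.inl (Or.inr h)), Or.inl (Or.inr h), Or.inl (Or.inl (Or.inl h)), Or.inr h]

theorem pred1_eq (sx ex y : Int) (symbols : List (Int × Int)) :
    (!(PySem.Set.inter (PySem.Set.ofList (getAdjCoords sx ex y)) (PySem.Set.ofList symbols)).isEmpty)
      = (adjacentB sx ex y).any (fun c => PySem.Set.contains (PySem.Set.ofList symbols) c) := by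
  rw [Bool.eq_iff_iff, Bool.not_eq_true', List.isEmpty_eq_false_iff, Ne,
    List.eq_nil_iff_forall_not_mem]
  constructor
  · intro h
    obtain ⟨q, hq⟩ := not_forall.mp h
    rw [not_not] at hq
    obtain ⟨h1, h2⟩ := (PySem.Set.mem_inter _ _ q).mp hq
    refine List.any_eq_true.mpr ⟨q, ?_, ?_⟩
    · exact (mem_adj_iff _ _ _ q).mp ((PySem.Set.mem_ofList _ q).mp h1)
    · exact (PySem.Set.contains_iff _ q).mpr h2
  · intro h hall
    obtain ⟨q, hq1, hq2⟩ := List.any_eq_true.mp h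
    exact hall q ((PySem.Set.mem_inter _ _ q).mpr
      ⟨(PySem.Set.mem_ofList _ q).mpr ((mem_adj_iff _ _ _ q).mpr hq1),
       (PySem.Set.contains_iff _ q).mp hq2⟩)

theorem part1_eq (input_data : List String) : solution input_data 1 = solution_alt input_data 1 := by
  unfold solution solution_alt
  rw [parse_eq]
  simp only [show ((1 : Int) == 1) = true from rfl, if_true]
  apply congrArg
  apply congrArg
  apply List.filter_congr
  intro t _
  exact pred1_eq t.2.1 t.2.2.1 t.2.2.2 (parseA input_data).2.1

-- every number recorded by B's scan has start_x ≤ end_x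
theorem scanB_inv (y : Int) (fuel : Nat) :
    ∀ (cs : List Char), cs.length ≤ fuel →
    ∀ (acc : List (Int × Int × Int × Int) × PySem.Set (Int × Int) × List (Int × Int)) (x : Int),
      (∀ t ∈ acc.1, t.2.1 ≤ t.2.2.1) →
      ∀ t ∈ (scanLineB y acc x cs).1, t.2.1 ≤ t.2.2.1 := by
  induction fuel with
  | zero =>
    intro cs hcs acc x hacc
    have : cs = [] := List.eq_nil_of_length_eq_zero (Nat.le_zero.mp hcs)
    subst this
    simpa [scanLineB] using hacc
  | succ fuel ih =>
    intro cs hcs acc x hacc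
    match cs with
    | [] => simpa [scanLineB] using hacc
    | c :: rest =>
      rw [scanLineB]
      by_cases hc : PySem.Chars.isdigit c
      · simp only [hc, if_true]
        have hlen : ((c :: rest).dropWhile PySem.Chars.isdigit).length ≤ fuel := by
          rw [List.dropWhile_cons_of_pos hc]
          have := List.length_dropWhile_le (p := PySem.Chars.isdigit) rest
          simp only [List.length_cons] at hcs; omega
        apply ih _ hlen
        intro t ht
        rcases List.mem_append.mp ht with h | h
        · exact hacc t h
        · have hge : 1 ≤ ((c :: rest).takeWhile PySem.Chars.isdigit).length := by
            rw [List.takeWhile_cons_of_pos hc]; simp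
          simp only [List.mem_singleton] at h
          subst h
          simp only
          omega
      · simp only [hc, Bool.false_eq_true, if_false]
        have hlen : rest.length ≤ fuel := by
          simp only [List.length_cons] at hcs; omega
        by_cases hdot : (c != '.') = true
        · simp only [hdot, if_true]
          by_cases hstar : (c == '*') = true
          · simp only [hstar, if_true]; exact ih _ hlen _ _ hacc
          · simp only [hstar, Bool.false_eq_true, if_false]; exact ih _ hlen _ _ hacc
        · simp only [hdot, Bool.false_eq_true, if_false]
          exact ih _ hlen _ _ hacc

theorem foldLines_inv (lines : List String) :
    ∀ (s : Int) (init : List (Int × Int × Int × Int) × PySem.Set (Int × Int) × List (Int × Int)),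
      (∀ t ∈ init.1, t.2.1 ≤ t.2.2.1) →
      ∀ t ∈ ((PySem.List.enumerate lines s).foldl (fun acc yl => scanLineB yl.1 acc 0 yl.2.toList) init).1,
        t.2.1 ≤ t.2.2.1 := by
  induction lines with
  | nil => intro s init hinv; simpa using hinv
  | cons l ls ih =>
    intro s init hinv
    simp only [PySem.List.enumerate_cons, List.foldl_cons]
    exact ih (s + 1) _ (scanB_inv s l.toList.length l.toList le_rfl init 0 hinv)

theorem parseB_inv (input_data : List String) :
    ∀ t ∈ (parseB input_data).1, t.2.1 ≤ t.2.2.1 := by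
  unfold parseB
  exact foldLines_inv input_data 0 _ (by simp)

theorem nodup_adjacentB (sx ex y : Int) (h : sx ≤ ex) : (adjacentB sx ex y).Nodup := by
  unfold adjacentB
  have hm : ∀ (z : Int), ((PySem.List.pyRange (sx - 1) (ex + 2) 1).map (fun ax => (ax, z))).Nodup :=
    fun z => (PySem.List.nodup_pyRange_one _ _).map (fun a b hab => by
      simpa using congrArg Prod.fst hab)
  simp only [List.cons_append, List.nil_append, List.nodup_cons, List.nodup_append,
    List.mem_append, List.mem_cons, List.mem_map, PySem.List.mem_pyRange_one]
  refine ⟨?_, ?_, hm _, hm _, ?_⟩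
  · rintro (hab | ⟨a, ha1, ha2⟩ | ⟨a, ha1, ha2⟩)
    · have h1 := congrArg Prod.fst hab; simp only at h1; omega
    · have h1 := congrArg Prod.snd ha2; simp only at h1; omega
    · have h1 := congrArg Prod.snd ha2; simp only at h1; omega
  · rintro (⟨a, ha1, ha2⟩ | ⟨a, ha1, ha2⟩) <;>
      (have h1 := congrArg Prod.snd ha2; simp only at h1; omega)
  · rintro p ⟨a, ha1, rfl⟩ q ⟨b, hb1, rfl⟩ hpq
    have h1 := congrArg Prod.snd hpq; simp only at h1; omega

theorem flatMap_if_singleton {α β : Type} (l : List α) (p : α → Bool) (f : α → β) :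
    l.flatMap (fun t => if p t then [f t] else []) = (l.filter p).map f := by
  induction l with
  | nil => rfl
  | cons a l ih =>
    by_cases hp : p a <;> simp [List.flatMap_cons, hp, ih]

theorem perT_eq (gears : List (Int × Int)) (g : Int × Int) (hg : g ∈ gears)
    (t : Int × Int × Int × Int) (ht : t.2.1 ≤ t.2.2.1) :
    ((((adjacentB t.2.1 t.2.2.1 t.2.2.2).filter
          (fun c => PySem.Set.contains (PySem.Set.ofList gears) c)).map
        (fun c => (c, t.1))).filter (fun p => p.1 == g)).map (fun p => p.2)
      = if (getAdjCoords t.2.1 t.2.2.1 t.2.2.2).contains g then [t.1] else [] := by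
  rw [List.filter_map, List.map_map]
  have hcomp : ((fun p : (Int × Int) × Int => p.1 == g) ∘ (fun c => (c, t.1))) = (fun c => c == g) := rfl
  rw [hcomp]
  rw [List.filter_filter]
  have hpt : ∀ c ∈ adjacentB t.2.1 t.2.2.1 t.2.2.2,
      ((c == g) && PySem.Set.contains (PySem.Set.ofList gears) c) = (c == g) := by
    intro c _
    by_cases hcg : c = g
    · subst hcg
      simp [PySem.Set.mem_ofList, hg]
    · simp [hcg]
  rw [List.filter_congr hpt, List.filter_beq]
  by_cases hmem : g ∈ adjacentB t.2.1 t.2.2.1 t.2.2.2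
  · rw [List.count_eq_one_of_mem (nodup_adjacentB _ _ _ ht) hmem]
    rw [if_pos (by rw [List.contains_iff_mem]; exact (mem_adj_iff _ _ _ g).mpr hmem)]
    rfl
  · rw [List.count_eq_zero.mpr hmem]
    rw [if_neg (by rw [List.contains_iff_mem]; exact fun hx => hmem ((mem_adj_iff _ _ _ g).mp hx))]
    rfl

theorem adjLists_getD (numbers : List (Int × Int × Int × Int)) (gears : List (Int × Int))
    (g : Int × Int) (hg : g ∈ gears) (hinv : ∀ t ∈ numbers, t.2.1 ≤ t.2.2.1) :
    (numbers.foldl (fun d t =>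
        (adjacentB t.2.1 t.2.2.1 t.2.2.2).foldl (fun d c =>
          if PySem.Set.contains (PySem.Set.ofList gears) c then d.modify c [] (fun l => l ++ [t.1])
          else d) d)
      PySem.Dict.empty).getD g []
    = (numbers.filter (fun t => (getAdjCoords t.2.1 t.2.2.1 t.2.2.2).contains g)).map (fun t => t.1) := by
  have h1 : ∀ (d : PySem.Dict (Int × Int) (List Int)) (t : Int × Int × Int × Int),
      (adjacentB t.2.1 t.2.2.1 t.2.2.2).foldl (fun d c =>
        if PySem.Set.contains (PySem.Set.ofList gears) c then d.modify c [] (fun l => l ++ [t.1])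
        else d) d
      = (((adjacentB t.2.1 t.2.2.1 t.2.2.2).filter
            (fun c => PySem.Set.contains (PySem.Set.ofList gears) c)).map
          (fun c => (c, t.1))).foldl (fun d p => d.modify p.1 [] (fun l => l ++ [p.2])) d := by
    intro d t
    rw [PySem.List.foldl_if_eq_foldl_filter, List.foldl_map]
  simp only [h1]
  rw [← List.foldl_flatMap]
  rw [PySem.Dict.getD_foldl_modify_append]
  rw [List.filter_flatMap, List.map_flatMap]
  rw [List.flatMap_congr (fun t htm => perT_eq gears g hg t (hinv t htm))]
  rw [flatMap_if_singleton]
  rfl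

theorem part2_eq (input_data : List String) : solution input_data 2 = solution_alt input_data 2 := by
  unfold solution solution_alt
  rw [parse_eq]
  simp only [show ((2 : Int) == 1) = false from rfl, show ((2 : Int) == 2) = true from rfl,
    Bool.false_eq_true, if_false, if_true]
  simp only [PySem.List.foldl_append_if, List.nil_append]
  set NUM := (parseA input_data).1 with hNUM
  set GRS := (parseA input_data).2.2 with hGRS
  set DF := NUM.foldl (fun d t =>
      (adjacentB t.2.1 t.2.2.1 t.2.2.2).foldl (fun d c =>
        if PySem.Set.contains (PySem.Set.ofList GRS) c then d.modify c [] (fun l => l ++ [t.1])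
        else d) d)
    PySem.Dict.empty with hDF
  have hinv : ∀ t ∈ NUM, t.2.1 ≤ t.2.2.1 := by
    have h := parseB_inv input_data
    rw [parse_eq] at h
    exact h
  have hD : ∀ g ∈ GRS, DF.getD g []
      = (NUM.filter (fun t => (getAdjCoords t.2.1 t.2.2.1 t.2.2.2).contains g)).map (fun t => t.1) :=
    fun g hgm => adjLists_getD NUM GRS g hgm hinv
  have hpred : ∀ g ∈ GRS,
      (PySem.List.len (DF.getD g []) == 2)
        = (PySem.List.len ((NUM.filter
            (fun t => (getAdjCoords t.2.1 t.2.2.1 t.2.2.2).contains g)).map Prod.fst) == 2) :=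
    fun g hgm => by rw [hD g hgm]
  rw [List.filter_congr hpred]
  apply congrArg List.sum
  apply List.map_congr_left
  intro g hgm
  rw [hD g (List.mem_filter.mp hgm).1]

-- ===== VERDICT (by name: the statement is the Claim_ definition above) =====
theorem solution_spec : Claim_equal_solution := by
  intro input_data part _ hpre
  unfold Spec_solution
  rcases hpre with h | h <;> subst h
  · exact part1_eq input_data
  · exact part2_eq input_data
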